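-- pv_equiv track=rewrite | github.com/Vartika222/RectitudeAI-PromptGuard | backend/layer3_behavior_monitor/asi_calculator.py | _topic_direction
-- ===== SOURCE A (Python) =====
-- _CAP_PROBE_TERMS = {
--     "tools", "access", "database", "files", "api", "keys", "admin",
--     "system", "password", "credentials", "data", "export", "list users",
--     "root", "override", "bypass", "ignore", "disregard", "forget",
--     "instructions", "rules", "restrictions", "permissions",
-- }
--
-- _BENIGN_TERMS = {
--     "weather", "recipe", "history", "sport", "movie", "book", "travel",
--     "cooking", "music", "language", "math", "science", "poetry",
-- }
--
-- def _topic_direction(prompt: str) -> str: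
--     lower = prompt.lower()
--     probe  = sum(1 for t in _CAP_PROBE_TERMS if t in lower)
--     benign = sum(1 for t in _BENIGN_TERMS    if t in lower)
--     if probe > benign:
--         return "probing"
--     if benign > probe:
--         return "benign"
--     return "neutral"
-- ===== SOURCE B (Python) =====
-- # Position-driven scan: walk the lowered prompt once; at each offset, match the
-- # remaining table entries as prefixes, consuming each matched entry so it counts once.
-- _WEIGHTED_TERMS = [
--     ("tools", 1), ("access", 1), ("database", 1), ("files", 1), ("api", 1),
--     ("keys", 1), ("admin", 1), ("system", 1), ("password", 1),
--     ("credentials", 1), ("data", 1), ("export", 1), ("list users", 1),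
--     ("root", 1), ("override", 1), ("bypass", 1), ("ignore", 1),
--     ("disregard", 1), ("forget", 1), ("instructions", 1), ("rules", 1),
--     ("restrictions", 1), ("permissions", 1),
--     ("weather", -1), ("recipe", -1), ("history", -1), ("sport", -1),
--     ("movie", -1), ("book", -1), ("travel", -1), ("cooking", -1),
--     ("music", -1), ("language", -1), ("math", -1), ("science", -1),
--     ("poetry", -1),
-- ]
--
-- def _topic_direction(prompt: str) -> str:
--     lower = prompt.lower()
--     remaining = list(_WEIGHTED_TERMS)
--     score = 0
--     for i in range(len(lower)):
--         still = []
--         for term, weight in remaining: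
--             if lower.startswith(term, i):
--                 score += weight
--             else:
--                 still.append((term, weight))
--         remaining = still
--     if score > 0:
--         return "probing"
--     if score < 0:
--         return "benign"
--     return "neutral"
-- ===== Notes on version B (the rewrite author's own statement) =====
-- stated objective: alternative
-- what changed: A tests each keyword once with a whole-string substring membership test and compares two counts; B instead scans the lowered prompt position by position, at each offset prefix-matching the entries of a weighted term table and consuming every matched entry from the table (so each term counts once), accumulating one signed score whose sign decides the label.
import Mathlib
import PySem

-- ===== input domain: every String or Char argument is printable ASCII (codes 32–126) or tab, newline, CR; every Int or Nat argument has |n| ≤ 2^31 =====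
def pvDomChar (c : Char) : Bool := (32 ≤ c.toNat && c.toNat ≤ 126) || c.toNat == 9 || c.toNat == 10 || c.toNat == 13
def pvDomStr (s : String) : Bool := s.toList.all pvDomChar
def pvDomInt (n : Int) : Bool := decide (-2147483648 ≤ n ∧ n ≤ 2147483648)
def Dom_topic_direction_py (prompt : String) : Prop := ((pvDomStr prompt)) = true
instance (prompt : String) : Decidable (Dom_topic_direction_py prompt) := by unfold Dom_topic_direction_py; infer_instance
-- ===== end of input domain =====

-- B replaces A's per-keyword whole-string substring tests and two counts by a single
-- position-by-position scan of the lowered prompt that prefix-matches and consumes entries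
-- of a weighted term table, accumulating one signed score (objective: alternative algorithm).

-- ===== PORT A =====
-- Python set literals, as PySem.Set (distinct elements, insertion order of the literal)
def capProbeTerms : PySem.Set String := PySem.Set.ofList ["tools", "access", "database", "files", "api", "keys", "admin", "system", "password", "credentials", "data", "export", "list users", "root", "override", "bypass", "ignore", "disregard", "forget", "instructions", "rules", "restrictions", "permissions"]
def benignTerms : PySem.Set String := PySem.Set.ofList ["weather", "recipe", "history", "sport", "movie", "book", "travel", "cooking", "music", "language", "math", "science", "poetry"]

-- sum(1 for t in S if t in lower): an order-independent count over the set
def topic_direction_py (prompt : String) : String :=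
  let lower := PySem.Str.lower prompt
  let probe : Int := capProbeTerms.foldl (fun acc t => if PySem.Str.isIn t lower then acc + 1 else acc) 0
  let benign : Int := benignTerms.foldl (fun acc t => if PySem.Str.isIn t lower then acc + 1 else acc) 0
  if probe > benign then "probing"
  else if benign > probe then "benign"
  else "neutral"

-- ===== PORT B =====
def weightedTerms : List (String × Int) := [("tools", 1), ("access", 1), ("database", 1), ("files", 1), ("api", 1), ("keys", 1), ("admin", 1), ("system", 1), ("password", 1), ("credentials", 1), ("data", 1), ("export", 1), ("list users", 1), ("root", 1), ("override", 1), ("bypass", 1), ("ignore", 1), ("disregard", 1), ("forget", 1), ("instructions", 1), ("rules", 1), ("restrictions", 1), ("permissions", 1), ("weather", -1), ("recipe", -1), ("history", -1), ("sport", -1), ("movie", -1), ("book", -1), ("travel", -1), ("cooking", -1), ("music", -1), ("language", -1), ("math", -1), ("science", -1), ("poetry", -1)]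

-- lower.startswith(term, i) is exact as Chars.startswith on the dropped suffix (0 ≤ i < len)
def topic_direction_py_alt (prompt : String) : String :=
  let lower := (PySem.Str.lower prompt).toList
  let st := (List.range lower.length).foldl
    (fun (st : List (String × Int) × Int) i =>
      st.1.foldl (fun (st2 : List (String × Int) × Int) tw =>
        if PySem.Chars.startswith (lower.drop i) tw.1.toList then (st2.1, st2.2 + tw.2)
        else (st2.1 ++ [tw], st2.2)) ([], st.2))
    (weightedTerms, 0)
  if st.2 > 0 then "probing"
  else if st.2 < 0 then "benign"
  else "neutral"

-- ===== PRECONDITION & SPEC =====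
def Spec_topic_direction_py (prompt : String) (out : String) : Prop := out = topic_direction_py_alt prompt
instance (prompt : String) (out : String) : Decidable (Spec_topic_direction_py prompt out) := by unfold Spec_topic_direction_py; infer_instance

-- ===== CLAIM (what is proved, stated in full; the proofs are below) =====
def Claim_equal_topic_direction_py : Prop := ∀ (prompt : String), Dom_topic_direction_py prompt → Spec_topic_direction_py prompt (topic_direction_py prompt)

-- ===== LEMMAS AND PROOFS =====

-- "term matched at some position before i"
def pvMatchB (lower : List Char) (i : Nat) (t : String) : Bool :=
  (List.range i).any (fun j => PySem.Chars.startswith (lower.drop j) t.toList)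

-- one inner pass over the remaining table, with general accumulator
theorem inner_pass (lower : List Char) (i : Nat) (rem acc : List (String × Int)) (s : Int) :
    rem.foldl (fun (st2 : List (String × Int) × Int) tw =>
        if PySem.Chars.startswith (lower.drop i) tw.1.toList then (st2.1, st2.2 + tw.2)
        else (st2.1 ++ [tw], st2.2)) (acc, s)
      = (acc ++ rem.filter (fun tw => ! PySem.Chars.startswith (lower.drop i) tw.1.toList),
         s + (rem.map (fun tw => if PySem.Chars.startswith (lower.drop i) tw.1.toList then tw.2 else 0)).sum) := by
  induction rem generalizing acc s with
  | nil => simp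
  | cons x xs ih =>
      simp only [List.foldl_cons, List.filter_cons, List.map_cons, List.sum_cons]
      by_cases h : PySem.Chars.startswith (lower.drop i) x.1.toList = true
      · rw [if_pos h, ih]; simp [h, add_assoc]
      · rw [if_neg h, ih]; simp [h, List.append_assoc]

theorem sum_map_filter (l : List (String × Int)) (p q : (String × Int) → Bool) :
    ((l.filter p).map (fun x => if q x then x.2 else 0)).sum
      = (l.map (fun x => if p x && q x then x.2 else 0)).sum := by
  induction l with
  | nil => rfl
  | cons x xs ih =>
      simp only [List.filter_cons, List.map_cons, List.sum_cons]
      by_cases h : p x = true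
      · simp [h, ih]
      · simp [h, ih]

theorem sum_map_split (l : List (String × Int)) (f g : (String × Int) → Int) :
    (l.map (fun x => f x + g x)).sum = (l.map f).sum + (l.map g).sum := by
  induction l with
  | nil => simp
  | cons x xs ih => simp [ih]; ring

-- outer loop invariant: after i positions the state is (unmatched-so-far table, score of matched-so-far)
theorem outer_inv (lower : List Char) (i : Nat) :
    (List.range i).foldl
      (fun (st : List (String × Int) × Int) i =>
        st.1.foldl (fun (st2 : List (String × Int) × Int) tw =>
          if PySem.Chars.startswith (lower.drop i) tw.1.toList then (st2.1, st2.2 + tw.2)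
          else (st2.1 ++ [tw], st2.2)) ([], st.2))
      (weightedTerms, 0)
    = (weightedTerms.filter (fun tw => ! pvMatchB lower i tw.1),
       (weightedTerms.map (fun tw => if pvMatchB lower i tw.1 then tw.2 else 0)).sum) := by
  induction i with
  | zero => simp [pvMatchB]
  | succ n ih =>
      rw [List.range_succ, List.foldl_append, ih, List.foldl_cons, List.foldl_nil]
      have hM : ∀ t, pvMatchB lower (n + 1) t
          = (pvMatchB lower n t || PySem.Chars.startswith (lower.drop n) t.toList) := by
        intro t
        simp [pvMatchB, List.range_succ, List.any_append]
      have hfil : (weightedTerms.filter (fun tw => ! pvMatchB lower n tw.1)).filter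
            (fun tw => ! PySem.Chars.startswith (lower.drop n) tw.1.toList)
          = weightedTerms.filter (fun tw => ! pvMatchB lower (n + 1) tw.1) := by
        rw [List.filter_filter]
        apply List.filter_congr
        intro tw _
        rw [hM]
        cases pvMatchB lower n tw.1 <;>
          cases PySem.Chars.startswith (lower.drop n) tw.1.toList <;> simp
      have hsum : (weightedTerms.map (fun tw => if pvMatchB lower n tw.1 then tw.2 else 0)).sum
            + ((weightedTerms.filter (fun tw => ! pvMatchB lower n tw.1)).map
                (fun tw => if PySem.Chars.startswith (lower.drop n) tw.1.toList then tw.2 else 0)).sum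
          = (weightedTerms.map (fun tw => if pvMatchB lower (n + 1) tw.1 then tw.2 else 0)).sum := by
        rw [sum_map_filter]
        have hpt : ∀ tw : String × Int,
            (if pvMatchB lower (n + 1) tw.1 then tw.2 else 0)
              = (if pvMatchB lower n tw.1 then tw.2 else 0)
                + (if (! pvMatchB lower n tw.1 && PySem.Chars.startswith (lower.drop n) tw.1.toList) then tw.2 else 0) := by
          intro tw
          rw [hM]
          cases pvMatchB lower n tw.1 <;>
            cases PySem.Chars.startswith (lower.drop n) tw.1.toList <;> simp
        calc (weightedTerms.map (fun tw => if pvMatchB lower n tw.1 then tw.2 else 0)).sum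
              + (weightedTerms.map (fun tw =>
                  if (! pvMatchB lower n tw.1 && PySem.Chars.startswith (lower.drop n) tw.1.toList) then tw.2 else 0)).sum
            = (weightedTerms.map (fun tw =>
                (if pvMatchB lower n tw.1 then tw.2 else 0)
                + (if (! pvMatchB lower n tw.1 && PySem.Chars.startswith (lower.drop n) tw.1.toList) then tw.2 else 0))).sum := by
              rw [sum_map_split]
          _ = (weightedTerms.map (fun tw => if pvMatchB lower (n + 1) tw.1 then tw.2 else 0)).sum := by
              congr 1; exact List.map_congr_left (fun tw _ => (hpt tw).symm)
      rw [inner_pass, List.nil_append, hfil]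
      exact congrArg _ hsum

-- at the end of the scan, "matched somewhere" is exactly Python's substring test (terms are nonempty)
theorem matchB_full (lower : List Char) (t : String) (ht : t.toList ≠ []) :
    pvMatchB lower lower.length t = PySem.Chars.isIn t.toList lower := by
  rw [Bool.eq_iff_iff]
  constructor
  · intro hm
    obtain ⟨j, _, hs⟩ := List.any_eq_true.mp hm
    exact (PySem.Chars.exists_prefix_drop_iff_isIn _ _).mp ⟨j, (PySem.Chars.startswith_iff _ _).mp hs⟩
  · intro hi
    obtain ⟨j, hj⟩ := (PySem.Chars.exists_prefix_drop_iff_isIn _ _).mpr hi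
    have hjlt : j < lower.length := by
      rcases Nat.lt_or_ge j lower.length with hlt | hge
      · exact hlt
      · rw [List.drop_eq_nil_of_le hge] at hj
        exact absurd (List.prefix_nil.mp hj) ht
    exact List.any_eq_true.mpr ⟨j, List.mem_range.mpr hjlt, (PySem.Chars.startswith_iff _ _).mpr hj⟩

-- counting fold with a fixed weight = init + weight * count
theorem foldl_weight_count (l : List String) (p : String → Bool) (w a : Int) :
    l.foldl (fun acc t => if p t then acc + w else acc) a = a + w * (l.countP p) := by
  induction l generalizing a with
  | nil => simp
  | cons x xs ih =>
      simp only [List.foldl_cons, List.countP_cons]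
      by_cases h : p x = true
      · rw [if_pos h, ih]; simp [h]; ring
      · rw [if_neg h, ih]; simp [h]

theorem sum_if_count (l : List String) (w : Int) (c : String → Bool) :
    (l.map (fun t => if c t then w else 0)).sum = w * (l.countP c) := by
  induction l with
  | nil => simp
  | cons x xs ih =>
      simp only [List.map_cons, List.sum_cons, List.countP_cons, ih]
      by_cases h : c x = true
      · simp [h]; ring
      · simp [h]

theorem sum_map_const_weight (l : List String) (w : Int) (c : String → Bool) :
    ((l.map (fun t => (t, w))).map (fun tw => if c tw.1 then tw.2 else 0)).sum
      = w * (l.countP c) := by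
  rw [List.map_map]
  exact sum_if_count l w c

-- the final weighted score is probe-count minus benign-count
theorem score_eq (lower : String) :
    (weightedTerms.map (fun tw => if PySem.Chars.isIn tw.1.toList lower.toList then tw.2 else 0)).sum
      = (capProbeTerms.countP (fun t => PySem.Str.isIn t lower) : Int)
        - (benignTerms.countP (fun t => PySem.Str.isIn t lower) : Int) := by
  have hsplit : weightedTerms
      = capProbeTerms.map (fun t => (t, (1 : Int))) ++ benignTerms.map (fun t => (t, (-1 : Int))) := by
    decide
  have hc : ∀ t : String, PySem.Chars.isIn t.toList lower.toList = PySem.Str.isIn t lower := by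
    intro t
    rw [Bool.eq_iff_iff, PySem.Chars.isIn_iff_infix, PySem.Str.isIn_iff_infix]
  rw [hsplit, List.map_append, List.sum_append]
  simp only [hc]
  rw [sum_map_const_weight capProbeTerms 1 (fun t => PySem.Str.isIn t lower),
      sum_map_const_weight benignTerms (-1) (fun t => PySem.Str.isIn t lower)]
  ring

theorem topic_direction_py_eq_alt (prompt : String) :
    topic_direction_py prompt = topic_direction_py_alt prompt := by
  have hne : ∀ tw ∈ weightedTerms, tw.1.toList ≠ [] := by decide
  have hmap : (weightedTerms.map (fun tw =>
        if pvMatchB (PySem.Str.lower prompt).toList (PySem.Str.lower prompt).toList.length tw.1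
        then tw.2 else 0)).sum
      = (weightedTerms.map (fun tw =>
          if PySem.Chars.isIn tw.1.toList (PySem.Str.lower prompt).toList then tw.2 else 0)).sum := by
    exact congrArg List.sum (List.map_congr_left (fun tw h => by rw [matchB_full _ _ (hne tw h)]))
  unfold topic_direction_py topic_direction_py_alt
  simp only [outer_inv]
  simp only [hmap, score_eq,
    foldl_weight_count (p := fun t => PySem.Str.isIn t (PySem.Str.lower prompt))]
  set p := (capProbeTerms.countP (fun t => PySem.Str.isIn t (PySem.Str.lower prompt)) : Int)
  set b := (benignTerms.countP (fun t => PySem.Str.isIn t (PySem.Str.lower prompt)) : Int)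
  by_cases h1 : p > b
  · rw [if_pos (by omega : 0 + 1 * p > 0 + 1 * b), if_pos (by omega : p - b > 0)]
  · rw [if_neg (by omega : ¬ 0 + 1 * p > 0 + 1 * b), if_neg (by omega : ¬ p - b > 0)]
    by_cases h2 : b > p
    · rw [if_pos (by omega : 0 + 1 * b > 0 + 1 * p), if_pos (by omega : p - b < 0)]
    · rw [if_neg (by omega : ¬ 0 + 1 * b > 0 + 1 * p), if_neg (by omega : ¬ p - b < 0)]

-- ===== VERDICT (by name: the statement is the Claim_ definition above) =====
theorem topic_direction_py_spec : Claim_equal_topic_direction_py := by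
  intro prompt _
  exact topic_direction_py_eq_alt prompt
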